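-- pv_equiv track=rewrite | github.com/sergo988/lab1 | task1.py | sum_prod
-- ===== SOURCE A (Python) =====
-- def sum_prod(matrixList, vectorList):
--     newMatrixList = []
--
--     for index in range(len(matrixList)):
--         newMatrix = []
--
--         for i in range(len(matrixList[index])):
--             row = []
--             for j in range(len(matrixList[index][i])):
--                 row.append(matrixList[index][i][j] * vectorList[index][j])
--
--             newMatrix.append(row)
--
--         newMatrixList.append(newMatrix)
--
--     matrix = newMatrixList[0]
--
--     for index in range(1, len(newMatrixList)):
--         for i in range(len(newMatrixList[index])):
--             for j in range(len(newMatrixList[index][i])):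
--                 matrix[i][j] += newMatrixList[index][i][j]
--
--     return matrix
-- ===== SOURCE B (Python) =====
-- def sum_prod(matrixList, vectorList):
--     result = [[a * v for a, v in zip(row, vectorList[0])] for row in matrixList[0]]
--     for M, vec in zip(matrixList[1:], vectorList[1:]):
--         for i, mRow in enumerate(M):
--             for j, (a, v) in enumerate(zip(mRow, vec)):
--                 result[i][j] += a * v
--     return result
-- ===== Notes on version B (the rewrite author's own statement) =====
-- stated objective: simpler
-- what changed: B fuses A's two phases (build the full list of scaled matrices, then sum them into the first) into one accumulation pass that never materialises the intermediate list, iterating with zip/enumerate over the data instead of index ranges.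
-- outside the precondition, e.g. on sum_prod([[[1]], []], [[2]]): A returns [[2]], B returns [[2]]
import Mathlib
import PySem

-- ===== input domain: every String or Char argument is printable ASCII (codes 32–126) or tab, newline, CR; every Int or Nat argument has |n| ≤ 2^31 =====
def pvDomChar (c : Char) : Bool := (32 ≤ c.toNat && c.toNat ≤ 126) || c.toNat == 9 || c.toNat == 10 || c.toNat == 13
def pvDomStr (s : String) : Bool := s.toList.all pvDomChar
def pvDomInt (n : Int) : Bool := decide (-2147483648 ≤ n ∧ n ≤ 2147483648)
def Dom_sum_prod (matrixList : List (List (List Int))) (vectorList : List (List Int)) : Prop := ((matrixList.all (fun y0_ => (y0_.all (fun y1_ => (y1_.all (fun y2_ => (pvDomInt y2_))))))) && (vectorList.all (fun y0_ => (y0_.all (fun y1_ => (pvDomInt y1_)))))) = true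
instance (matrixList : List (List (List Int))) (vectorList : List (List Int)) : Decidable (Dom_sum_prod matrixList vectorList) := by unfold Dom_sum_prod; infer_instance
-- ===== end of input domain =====

-- B (sum_prod_alt) fuses A's two phases (build all scaled matrices, then sum into the first) into one
-- accumulation pass over zip/enumerate that never materialises the intermediate list; objective: simpler.
-- Python A mutates newMatrixList[0] in place, but that list is internal, so no caller-visible mutation.
-- ===== PORT A =====
-- A's update 'matrix[i][j] += newMatrixList[index][i][j]' as a helper (pure transliteration of the two inner loops)
def pyAddInto (matrix : List (List Int)) (Mi : List (List Int)) : List (List Int) :=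
  (PySem.List.pyRange 0 (Mi.length : Int) 1).foldl (fun matrix i =>
    let rowi := PySem.List.pyGetD Mi i []
    (PySem.List.pyRange 0 (rowi.length : Int) 1).foldl (fun matrix j =>
      let mi := PySem.List.pyGetD matrix i []
      PySem.List.pySetD matrix i
        (PySem.List.pySetD mi j (PySem.List.pyGetD mi j 0 + PySem.List.pyGetD rowi j 0))) matrix) matrix

def sum_prod (matrixList : List (List (List Int))) (vectorList : List (List Int)) : List (List Int) :=
  let newMatrixList :=
    (PySem.List.pyRange 0 (matrixList.length : Int) 1).map (fun index =>
      let M := PySem.List.pyGetD matrixList index []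
      let v := PySem.List.pyGetD vectorList index []
      (PySem.List.pyRange 0 (M.length : Int) 1).map (fun i =>
        let row := PySem.List.pyGetD M i []
        (PySem.List.pyRange 0 (row.length : Int) 1).map (fun j =>
          PySem.List.pyGetD row j 0 * PySem.List.pyGetD v j 0)))
  let matrix := PySem.List.pyGetD newMatrixList 0 []
  (PySem.List.pyRange 1 (newMatrixList.length : Int) 1).foldl (fun matrix index =>
    pyAddInto matrix (PySem.List.pyGetD newMatrixList index [])) matrix

-- ===== PORT B =====
-- B's inner loops: 'for i, mRow in enumerate(M): for j, (a, v) in enumerate(zip(mRow, vec)): result[i][j] += a * v'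
def altAddInto (result : List (List Int)) (M : List (List Int)) (vec : List Int) : List (List Int) :=
  (PySem.List.enumerate M 0).foldl (fun result irow =>
    (PySem.List.enumerate (irow.2.zip vec) 0).foldl (fun result jav =>
      let ri := PySem.List.pyGetD result irow.1 []
      PySem.List.pySetD result irow.1
        (PySem.List.pySetD ri jav.1 (PySem.List.pyGetD ri jav.1 0 + jav.2.1 * jav.2.2))) result) result

def sum_prod_alt (matrixList : List (List (List Int))) (vectorList : List (List Int)) : List (List Int) :=
  let v0 := PySem.List.pyGetD vectorList 0 []
  let result := (PySem.List.pyGetD matrixList 0 []).map (fun row => (row.zip v0).map (fun p => p.1 * p.2))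
  ((PySem.List.slice matrixList (some 1) none).zip (PySem.List.slice vectorList (some 1) none)).foldl
    (fun result Mv => altAddInto result Mv.1 Mv.2) result

-- ===== PRECONDITION & SPEC =====
-- Pre_ excludes exactly the inputs on which Python A raises IndexError (empty matrixList; a row longer
-- than its vector; a later nonempty row sticking out of the first matrix), plus one stated narrowing:
-- it requires len(matrixList) <= len(vectorList) wholesale, which also excludes inputs where the
-- unmatched trailing matrices consist only of empty rows (there A never touches the missing vectors and
-- still returns; both programs return the same value on such inputs).
def Pre_sum_prod (matrixList : List (List (List Int))) (vectorList : List (List Int)) : Prop :=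
  matrixList ≠ [] ∧ matrixList.length ≤ vectorList.length ∧
  (∀ p ∈ matrixList.zip vectorList, ∀ row ∈ p.1, row.length ≤ p.2.length) ∧
  (∀ M ∈ matrixList.drop 1, ∀ q ∈ M.zipIdx, q.1 ≠ [] →
      q.2 < (matrixList.getD 0 []).length ∧ q.1.length ≤ ((matrixList.getD 0 []).getD q.2 []).length)
instance (matrixList : List (List (List Int))) (vectorList : List (List Int)) : Decidable (Pre_sum_prod matrixList vectorList) := by unfold Pre_sum_prod; infer_instance

def pvWitness_sum_prod : List (List (List Int)) × List (List Int) :=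
  ([[[1, 2], [3, 4]], [[5, 6], [7, 8]]], [[1, 1], [2, 2]])

def Spec_sum_prod (matrixList : List (List (List Int))) (vectorList : List (List Int)) (out : List (List Int)) : Prop := out = sum_prod_alt matrixList vectorList
instance (matrixList : List (List (List Int))) (vectorList : List (List Int)) (out : List (List Int)) : Decidable (Spec_sum_prod matrixList vectorList out) := by unfold Spec_sum_prod; infer_instance

-- ===== CLAIM (what is proved, stated in full; the proofs are below) =====
def Claim_equal_sum_prod : Prop := ∀ (matrixList : List (List (List Int))) (vectorList : List (List Int)), Dom_sum_prod matrixList vectorList → Pre_sum_prod matrixList vectorList → Spec_sum_prod matrixList vectorList (sum_prod matrixList vectorList)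

-- ===== LEMMAS AND PROOFS =====

-- the element-wise scaled matrix, the common value both ports manipulate
def scaledM (M : List (List Int)) (v : List Int) : List (List Int) :=
  M.map (fun row => (row.zip v).map (fun p => p.1 * p.2))

theorem zip_drop_one {α β : Type} (xs : List α) (ys : List β) :
    (xs.zip ys).drop 1 = (xs.drop 1).zip (ys.drop 1) := by
  cases xs <;> cases ys <;> simp

theorem scale_row (row v : List Int) (h : row.length ≤ v.length) :
    (PySem.List.pyRange 0 (row.length : Int) 1).map
      (fun j => PySem.List.pyGetD row j 0 * PySem.List.pyGetD v j 0)
    = (row.zip v).map (fun p => p.1 * p.2) := by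
  rw [PySem.List.pyRange_zero_nat, List.map_map]
  apply List.ext_getElem
  · simp; omega
  · intro k h1 h2
    have hk : k < row.length := by simpa using h1
    have hkv : k < v.length := by omega
    simp [PySem.List.pyGetD_natCast, List.getElem_zip, hk, hkv]

theorem scale_mat (M : List (List Int)) (v : List Int)
    (h : ∀ row ∈ M, row.length ≤ v.length) :
    (PySem.List.pyRange 0 (M.length : Int) 1).map
      (fun i =>
        (PySem.List.pyRange 0 ((PySem.List.pyGetD M i []).length : Int) 1).map
          (fun j => PySem.List.pyGetD (PySem.List.pyGetD M i []) j 0 * PySem.List.pyGetD v j 0))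
    = scaledM M v := by
  rw [PySem.List.pyRange_zero_nat, List.map_map]
  apply List.ext_getElem
  · simp [scaledM]
  · intro k h1 h2
    have hk : k < M.length := by simpa using h1
    simp only [List.getElem_map, List.getElem_range, Function.comp_apply,
      PySem.List.pyGetD_natCast, List.getD_eq_getElem _ _ hk, scaledM]
    exact scale_row _ _ (h _ (List.getElem_mem hk))

theorem scale_mat_list (mL : List (List (List Int))) (vL : List (List Int))
    (h2 : mL.length ≤ vL.length)
    (h3 : ∀ p ∈ mL.zip vL, ∀ row ∈ p.1, row.length ≤ p.2.length) :
    (PySem.List.pyRange 0 (mL.length : Int) 1).map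
      (fun index =>
        (PySem.List.pyRange 0 ((PySem.List.pyGetD mL index []).length : Int) 1).map
          (fun i =>
            (PySem.List.pyRange 0 ((PySem.List.pyGetD (PySem.List.pyGetD mL index []) i []).length : Int) 1).map
              (fun j => PySem.List.pyGetD (PySem.List.pyGetD (PySem.List.pyGetD mL index []) i []) j 0
                * PySem.List.pyGetD (PySem.List.pyGetD vL index []) j 0)))
    = (mL.zip vL).map (fun p => scaledM p.1 p.2) := by
  rw [PySem.List.pyRange_zero_nat, List.map_map]
  apply List.ext_getElem
  · simp; omega
  · intro k h1 hZ
    have hk : k < mL.length := by simpa using h1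
    have hkv : k < vL.length := by omega
    simp only [List.getElem_map, List.getElem_range, Function.comp_apply,
      PySem.List.pyGetD_natCast, List.getD_eq_getElem _ _ hk, List.getD_eq_getElem _ _ hkv,
      List.getElem_zip]
    exact scale_mat _ _ (fun row hr => h3 (mL[k], vL[k])
      (by rw [List.mem_iff_getElem]; exact ⟨k, by simp [List.length_zip]; omega, by simp [List.getElem_zip]⟩) row hr)

theorem add_eq (m : List (List Int)) (M : List (List Int)) (vec : List Int) :
    pyAddInto m (scaledM M vec) = altAddInto m M vec := by
  simp only [pyAddInto, altAddInto]
  rw [PySem.List.enumerate_eq_map_pyRange M [], List.foldl_map]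
  have hlen : ((scaledM M vec).length : Int) = PySem.List.len M := by
    simp [scaledM, PySem.List.len]
  rw [hlen]
  apply PySem.List.foldl_congr_mem
  intro acc i hi
  obtain ⟨hi0, hi1⟩ := PySem.List.mem_pyRange_one.mp hi
  have hiN : i.toNat < M.length := by
    have h' : i < (M.length : Int) := hi1
    omega
  have hrow : PySem.List.pyGetD (scaledM M vec) i [] = ((M[i.toNat].zip vec).map (fun p => p.1 * p.2)) := by
    rw [PySem.List.pyGetD_eq_getElem _ _ hi0 (by simpa [scaledM] using (hi1 : i < (M.length : Int)))]
    simp [scaledM]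
  have hrowB : PySem.List.pyGetD M i [] = M[i.toNat] :=
    PySem.List.pyGetD_eq_getElem _ _ hi0 (hi1 : i < (M.length : Int))
  simp only [hrow, hrowB]
  rw [PySem.List.enumerate_eq_map_pyRange (M[i.toNat].zip vec) ((0 : Int), (0 : Int)),
      List.foldl_map]
  have hlen2 : (((M[i.toNat].zip vec).map (fun p => p.1 * p.2)).length : Int)
      = PySem.List.len (M[i.toNat].zip vec) := by simp [PySem.List.len]
  rw [hlen2]
  apply PySem.List.foldl_congr_mem
  intro acc2 j hj
  obtain ⟨hj0, hj1⟩ := PySem.List.mem_pyRange_one.mp hj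
  have hjN : j.toNat < (M[i.toNat].zip vec).length := by
    have h' : j < (((M[i.toNat].zip vec)).length : Int) := hj1
    omega
  have hval : PySem.List.pyGetD ((M[i.toNat].zip vec).map (fun p => p.1 * p.2)) j 0
      = (PySem.List.pyGetD (M[i.toNat].zip vec) j ((0 : Int), (0 : Int))).1
        * (PySem.List.pyGetD (M[i.toNat].zip vec) j ((0 : Int), (0 : Int))).2 := by
    rw [PySem.List.pyGetD_eq_getElem _ _ hj0 (by simp only [List.length_map]; omega),
        PySem.List.pyGetD_eq_getElem _ _ hj0 (by omega)]
    simp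
  simp only [hval]

-- ===== VERDICT (by name: the statement is the Claim_ definition above) =====
theorem sum_prod_spec : Claim_equal_sum_prod := by
  intro mL vL _ hpre
  obtain ⟨h1, h2, h3, -⟩ := hpre
  obtain ⟨m0, rest, rfl⟩ : ∃ m0 rest, mL = m0 :: rest := by
    cases mL with
    | nil => exact absurd rfl h1
    | cons a l => exact ⟨a, l, rfl⟩
  obtain ⟨v0, vrest, rfl⟩ : ∃ v0 vrest, vL = v0 :: vrest := by
    cases vL with
    | nil => simp at h2
    | cons a l => exact ⟨a, l, rfl⟩
  unfold Spec_sum_prod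
  simp only [sum_prod, sum_prod_alt]
  rw [scale_mat_list _ _ h2 h3]
  rw [PySem.List.foldl_pyRange_pyGetD' _ _ _ _ (by norm_num : (0:Int) ≤ 1)]
  rw [show (1 : Int).toNat = 1 from rfl, ← List.map_drop, zip_drop_one, List.foldl_map]
  rw [PySem.List.slice_from_one, PySem.List.slice_from_one]
  simp only [List.drop_succ_cons, List.drop_zero, List.tail_cons, List.zip_cons_cons,
    List.map_cons, PySem.List.pyGetD_zero_cons, scaledM]
  apply PySem.List.foldl_congr_mem
  intro acc p _
  exact add_eq acc p.1 p.2
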